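-- pv_equiv track=rewrite | github.com/pypi-data/pypi-mirror-390 | packages/neurosurfer/neurosurfer-0.1.2-py3-none-any.whl/neurosurfer/rag/chunker.py | _clean_lines
-- ===== SOURCE A (Python) =====
-- def _clean_lines(chunk_lines, comment_block_threshold=4):
--     cleaned = []
--     comment_block = []
--     for line in chunk_lines:
--         stripped = line.strip()
--         if stripped.startswith("#") or not stripped:
--             comment_block.append(line)
--         else:
--             if len(comment_block) >= comment_block_threshold:
--                 comment_block = []  # drop
--             else:
--                 cleaned.extend(comment_block)
--                 comment_block = []
--             cleaned.append(line)
--     if len(comment_block) < comment_block_threshold: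
--         cleaned.extend(comment_block)
--     return cleaned
-- ===== SOURCE B (Python) =====
-- def _clean_lines(chunk_lines, comment_block_threshold=4):
--     def is_comment(line):
--         s = line.strip()
--         return s.startswith("#") or not s
--     out = []
--     i, n = 0, len(chunk_lines)
--     while i < n:
--         key = is_comment(chunk_lines[i])
--         j = i + 1
--         while j < n and is_comment(chunk_lines[j]) == key:
--             j += 1
--         if not key or j - i < comment_block_threshold:
--             out.extend(chunk_lines[i:j])
--         i = j
--     return out
-- ===== Notes on version B (the rewrite author's own statement) =====
-- stated objective: idiomatic
-- what changed: Replaces the stateful comment_block accumulator with its two flush points by a run-based scan: split the input into maximal runs of comment/blank vs code lines and keep each run unless it is a comment run of length >= threshold.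
import Mathlib
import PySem

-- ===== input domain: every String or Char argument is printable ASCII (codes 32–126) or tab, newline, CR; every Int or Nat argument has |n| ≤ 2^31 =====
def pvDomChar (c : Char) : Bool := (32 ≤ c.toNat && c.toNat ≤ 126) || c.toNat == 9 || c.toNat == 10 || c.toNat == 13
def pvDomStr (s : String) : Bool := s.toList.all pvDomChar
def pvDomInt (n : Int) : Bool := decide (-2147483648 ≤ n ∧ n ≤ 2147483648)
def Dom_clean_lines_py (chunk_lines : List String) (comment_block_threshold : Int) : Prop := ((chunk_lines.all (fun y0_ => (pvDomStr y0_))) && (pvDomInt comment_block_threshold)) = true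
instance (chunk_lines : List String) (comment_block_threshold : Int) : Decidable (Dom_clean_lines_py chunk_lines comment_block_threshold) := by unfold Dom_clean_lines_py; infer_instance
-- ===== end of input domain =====

-- B replaces A's stateful comment_block accumulator (with its two flush points) by a
-- run-based scan over maximal comment/code runs; same O(n) cost, different decomposition.

-- ===== PORT A =====
-- one step of A's loop: state = (cleaned, comment_block)
def cleanStepA (t : Int) (s : List String × List String) (line : String) :
    List String × List String :=
  let stripped := PySem.Str.strip line
  if PySem.Str.startswith stripped "#" || stripped == "" then
    (s.1, s.2 ++ [line])
  else
    if (s.2.length : Int) ≥ t then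
      (s.1 ++ [line], [])
    else
      (s.1 ++ s.2 ++ [line], [])

def clean_lines_py (chunk_lines : List String) (comment_block_threshold : Int) : List String :=
  let st := chunk_lines.foldl (cleanStepA comment_block_threshold) ([], [])
  if (st.2.length : Int) < comment_block_threshold then st.1 ++ st.2 else st.1

-- ===== PORT B =====
def isCommentB (line : String) : Bool :=
  let s := PySem.Str.strip line
  PySem.Str.startswith s "#" || s == ""

-- run scan: run = maximal prefix with the head's key (Source B's inner while j loop),
-- kept unless it is a long comment run, then continue on the rest
def clean_lines_py_alt (chunk_lines : List String) (comment_block_threshold : Int) : List String :=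
  match chunk_lines with
  | [] => []
  | l :: ls =>
    let key := isCommentB l
    let run := l :: ls.takeWhile (fun x => isCommentB x == key)
    let rest := ls.dropWhile (fun x => isCommentB x == key)
    (if !key || (run.length : Int) < comment_block_threshold then run else []) ++
      clean_lines_py_alt rest comment_block_threshold
termination_by chunk_lines.length
decreasing_by
  simp only [List.length_cons]
  exact Nat.lt_succ_of_le (List.length_dropWhile_le _ _)

-- ===== PRECONDITION & SPEC =====
def Spec_clean_lines_py (chunk_lines : List String) (comment_block_threshold : Int) (out : List String) : Prop := out = clean_lines_py_alt chunk_lines comment_block_threshold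
instance (chunk_lines : List String) (comment_block_threshold : Int) (out : List String) : Decidable (Spec_clean_lines_py chunk_lines comment_block_threshold out) := by unfold Spec_clean_lines_py; infer_instance

-- ===== CLAIM (what is proved, stated in full; the proofs are below) =====
def Claim_equal_clean_lines_py : Prop := ∀ (chunk_lines : List String) (comment_block_threshold : Int), Dom_clean_lines_py chunk_lines comment_block_threshold → Spec_clean_lines_py chunk_lines comment_block_threshold (clean_lines_py chunk_lines comment_block_threshold)

-- ===== LEMMAS AND PROOFS =====

-- finalize A's state
def finA (t : Int) (s : List String × List String) : List String :=
  if (s.2.length : Int) < t then s.1 ++ s.2 else s.1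

-- the accumulated `cleaned` is a pure prefix of the state
theorem stepA_prefix (t : Int) (c : List String) (b : List String) (x : String) :
    cleanStepA t (c, b) x = (c ++ (cleanStepA t ([], b) x).1, (cleanStepA t ([], b) x).2) := by
  simp only [cleanStepA]
  split_ifs <;> simp

theorem foldA_prefix (t : Int) (xs : List String) (c b : List String) :
    xs.foldl (cleanStepA t) (c, b) =
      (c ++ (xs.foldl (cleanStepA t) ([], b)).1, (xs.foldl (cleanStepA t) ([], b)).2) := by
  induction xs generalizing c b with
  | nil => simp
  | cons x xs ih =>
    simp only [List.foldl_cons]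
    rw [stepA_prefix, ih, ih ((cleanStepA t ([], b) x).1)]
    simp

theorem finA_append (t : Int) (c : List String) (s : List String × List String) :
    finA t (c ++ s.1, s.2) = c ++ finA t s := by
  simp only [finA]; split_ifs <;> simp

-- folding a run of comment lines just appends them to the block
theorem foldA_comments (t : Int) (xs : List String) (hc : ∀ x ∈ xs, isCommentB x = true)
    (c b : List String) : xs.foldl (cleanStepA t) (c, b) = (c, b ++ xs) := by
  induction xs generalizing b with
  | nil => simp
  | cons x xs ih =>
    have hx := hc x (by simp)
    simp only [List.foldl_cons, cleanStepA]
    rw [show (PySem.Str.startswith (PySem.Str.strip x) "#" || PySem.Str.strip x == "") = true from hx]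
    simp only [if_true]
    rw [ih (fun y hy => hc y (by simp [hy]))]
    simp

-- a code line with empty block just appends to cleaned, regardless of t
theorem stepA_code_nil (t : Int) (c : List String) (x : String)
    (hx : isCommentB x = false) : cleanStepA t (c, []) x = (c ++ [x], []) := by
  simp only [cleanStepA, isCommentB] at *
  rw [hx]
  simp only [Bool.false_eq_true, if_false, List.length_nil, Int.ofNat_zero]
  split_ifs <;> simp

theorem dropWhile_head_false {a : Type} (p : a → Bool) (l : List a) (r : a) (rs : List a)
    (h : l.dropWhile p = r :: rs) : p r = false := by
  induction l with
  | nil => simp at h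
  | cons x l ih =>
    rw [List.dropWhile_cons] at h
    by_cases hpx : p x = true
    · rw [if_pos hpx] at h; exact ih h
    · rw [if_neg hpx] at h
      injection h with h1 _
      subst h1; simpa using hpx

-- folding a run of code lines (block empty) just appends them to cleaned
theorem foldA_codes (t : Int) (xs : List String) (hc : ∀ x ∈ xs, isCommentB x = false)
    (c : List String) : xs.foldl (cleanStepA t) (c, []) = (c ++ xs, []) := by
  induction xs generalizing c with
  | nil => simp
  | cons x xs ih =>
    simp only [List.foldl_cons]
    rw [stepA_code_nil t c x (hc x (by simp)), ih (fun y hy => hc y (by simp [hy]))]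
    simp

theorem main_lemma_aux (t : Int) (n : Nat) (xs : List String) (hn : xs.length ≤ n) :
    finA t (xs.foldl (cleanStepA t) ([], [])) = clean_lines_py_alt xs t := by
  induction n generalizing xs with
  | zero =>
    have : xs = [] := List.eq_nil_of_length_eq_zero (Nat.le_zero.mp hn)
    subst this
    simp [finA, clean_lines_py_alt]
  | succ n ih =>
    match xs with
    | [] =>
      simp [finA, clean_lines_py_alt]
    | l :: ls =>
      rw [clean_lines_py_alt]
      set key := isCommentB l with hkey
      set p : String → Bool := fun x => isCommentB x == key with hp
      have hsplit : l :: ls = (l :: ls.takeWhile p) ++ ls.dropWhile p := by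
        simp [List.takeWhile_append_dropWhile]
      have hrest_len : (ls.dropWhile p).length ≤ n := by
        have := List.length_dropWhile_le p ls
        simp only [List.length_cons] at hn; omega
      rw [hsplit, List.foldl_append]
      cases hkb : key with
      | true =>
        -- a comment run
        have hrun : ∀ x ∈ l :: ls.takeWhile p, isCommentB x = true := by
          intro x hx
          rcases List.mem_cons.mp hx with h | h
          · rw [h, ← hkey]; exact hkb
          · have := List.mem_takeWhile_imp h
            simp only [hp, beq_iff_eq, hkb] at this ⊢; exact this
        rw [foldA_comments t _ hrun [] []]
        simp only [List.nil_append]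
        match hrest : ls.dropWhile p with
        | [] =>
          simp only [List.foldl_nil, finA]
          have : clean_lines_py_alt ([] : List String) t = [] := by
            rw [clean_lines_py_alt]
          rw [this]
          simp only [Bool.not_true, Bool.false_or, List.append_nil, List.nil_append,
            decide_eq_true_eq]
        | r :: rs =>
          have hr : isCommentB r = false := by
            have := dropWhile_head_false p ls r rs hrest
            simp only [hp, hkb] at this
            simpa using this
          have hrlen : rs.length < n := by
            have := hrest_len; rw [hrest] at this; simp at this; omega
          simp only [List.foldl_cons]
          have hstep : cleanStepA t ([], l :: ls.takeWhile p) r =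
              ((if ((l :: ls.takeWhile p).length : Int) ≥ t then [r]
                else (l :: ls.takeWhile p) ++ [r]), []) := by
            simp only [cleanStepA, isCommentB] at hr ⊢
            rw [hr]
            simp only [Bool.false_eq_true, if_false]
            split_ifs <;> simp
          rw [hstep]
          have hih : clean_lines_py_alt (r :: rs) t =
              r :: finA t (rs.foldl (cleanStepA t) ([], [])) := by
            rw [← ih (r :: rs) (by simp only [List.length_cons]; omega)]
            simp only [List.foldl_cons, stepA_code_nil t [] r hr, List.nil_append]
            rw [foldA_prefix t rs [r] [], finA_append]
            rfl
          rw [foldA_prefix t rs _ [], finA_append, hih]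
          have hK : (if ((l :: ls.takeWhile p).length : Int) ≥ t then [r]
                else (l :: ls.takeWhile p) ++ [r]) =
              (if (!true || decide (((l :: ls.takeWhile p).length : Int) < t)) = true
                then l :: ls.takeWhile p else []) ++ [r] := by
            simp only [Bool.not_true, Bool.false_or, decide_eq_true_eq]
            split_ifs with h1 h2 <;> first | omega | simp
          rw [hK, List.append_assoc]
          simp
      | false =>
        -- a code run
        have hrun : ∀ x ∈ l :: ls.takeWhile p, isCommentB x = false := by
          intro x hx
          rcases List.mem_cons.mp hx with h | h
          · rw [h, ← hkey]; exact hkb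
          · have := List.mem_takeWhile_imp h
            simp only [hp, beq_iff_eq, hkb] at this ⊢; exact this
        rw [foldA_codes t _ hrun []]
        simp only [List.nil_append]
        rw [foldA_prefix t _ _ [], finA_append]
        rw [show ((([] : List String), ([] : List String))) = (([] : List String), ([] : List String)) from rfl]
        rw [ih (ls.dropWhile p) hrest_len]
        simp

theorem main_lemma (t : Int) (xs : List String) :
    finA t (xs.foldl (cleanStepA t) ([], [])) = clean_lines_py_alt xs t :=
  main_lemma_aux t xs.length xs le_rfl

-- ===== VERDICT (by name: the statement is the Claim_ definition above) =====
theorem clean_lines_py_spec : Claim_equal_clean_lines_py := by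
  intro xs t _
  unfold Spec_clean_lines_py clean_lines_py
  exact main_lemma t xs
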